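-- pv_equiv track=rewrite | github.com/trace-survey-analysis/trace-processor | utils/logging.py | _format_keyvals
-- ===== SOURCE A (Python) =====
-- from typing import Any, Dict, List, Tuple, Union
--
-- def _format_keyvals(keyvals: List[Any]) -> str:
--     """Format key-value pairs for logging, similar to Go's logger"""
--     if not keyvals:
--         return ""
--
--     result = ""
--     for i in range(0, len(keyvals), 2):
--         key = keyvals[i]
--         value = "missing" if i + 1 >= len(keyvals) else keyvals[i + 1]
--         result += f" {key}={value}"
--
--     return result
-- ===== SOURCE B (Python) =====
-- from itertools import zip_longest
--
-- def _format_keyvals(keyvals):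
--     """Format key-value pairs for logging, similar to Go's logger"""
--     it = iter(keyvals)
--     return "".join(f" {k}={v}" for k, v in zip_longest(it, it, fillvalue="missing"))
-- ===== Notes on version B (the rewrite author's own statement) =====
-- stated objective: idiomatic
-- what changed: Replaces the explicit index-stepping loop with bounds check and string accumulation by pairwise grouping via zip_longest(it, it, fillvalue='missing') and a single ''.join over formatted pieces.
import Mathlib
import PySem

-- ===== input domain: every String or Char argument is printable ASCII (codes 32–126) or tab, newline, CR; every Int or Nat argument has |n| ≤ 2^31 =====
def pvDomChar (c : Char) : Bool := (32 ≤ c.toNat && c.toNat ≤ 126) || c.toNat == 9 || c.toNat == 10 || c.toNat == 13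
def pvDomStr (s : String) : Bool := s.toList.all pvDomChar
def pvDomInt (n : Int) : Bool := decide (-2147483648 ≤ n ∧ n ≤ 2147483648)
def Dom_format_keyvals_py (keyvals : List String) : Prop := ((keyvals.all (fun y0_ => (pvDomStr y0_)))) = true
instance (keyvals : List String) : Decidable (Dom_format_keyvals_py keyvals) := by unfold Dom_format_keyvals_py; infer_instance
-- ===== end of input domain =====

-- Port of utils/logging.py _format_keyvals; B groups the list into (key,value) pairs
-- (zip_longest(it, it, fillvalue="missing")) and joins formatted pieces instead of
-- index-stepping with a bounds check and string accumulation. Equivalence proved on all inputs.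


-- ===== PORT A =====
def format_keyvals_py (keyvals : List String) : String :=
  if keyvals = [] then ""
  else
    (PySem.List.pyRange 0 (PySem.List.len keyvals) 2).foldl
      (fun result i =>
        let key := PySem.List.pyGetD keyvals i ""
        let value := if i + 1 ≥ PySem.List.len keyvals then "missing"
                     else PySem.List.pyGetD keyvals (i + 1) ""
        result ++ (" " ++ key ++ "=" ++ value)) ""

-- ===== PORT B =====
-- zip_longest(it, it, fillvalue="missing") on one iterator: consecutive pairs,
-- an unmatched last key gets the fill value.
def pairUp : List String → List (String × String)
  | [] => []
  | [k] => [(k, "missing")]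
  | k :: v :: rest => (k, v) :: pairUp rest

def format_keyvals_py_alt (keyvals : List String) : String :=
  String.join ((pairUp keyvals).map (fun kv => " " ++ kv.1 ++ "=" ++ kv.2))

-- ===== PRECONDITION & SPEC =====
def Spec_format_keyvals_py (keyvals : List String) (out : String) : Prop := out = format_keyvals_py_alt keyvals
instance (keyvals : List String) (out : String) : Decidable (Spec_format_keyvals_py keyvals out) := by unfold Spec_format_keyvals_py; infer_instance

-- ===== CLAIM (what is proved, stated in full; the proofs are below) =====
def Claim_equal_format_keyvals_py : Prop := ∀ (keyvals : List String), Dom_format_keyvals_py keyvals → Spec_format_keyvals_py keyvals (format_keyvals_py keyvals)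

-- ===== LEMMAS AND PROOFS =====

lemma pyRange_two_nil (a b : Int) (h : b ≤ a) : PySem.List.pyRange a b 2 = [] := by
  rw [PySem.List.pyRange_of_pos _ _ (by norm_num : (0:Int) < 2)]
  rw [if_neg (by omega)]
  simp

lemma pyRange_two_cons (a b : Int) (h : a < b) :
    PySem.List.pyRange a b 2 = a :: PySem.List.pyRange (a + 2) b 2 := by
  rw [PySem.List.pyRange_of_pos _ _ (by norm_num : (0:Int) < 2),
      PySem.List.pyRange_of_pos _ _ (by norm_num : (0:Int) < 2)]
  by_cases h2 : a + 2 < b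
  · rw [if_pos h, if_pos h2]
    have hc : ((b - a + 2 - 1) / 2).toNat = ((b - (a + 2) + 2 - 1) / 2).toNat + 1 := by omega
    rw [hc, List.range_succ_eq_map, List.map_cons, List.map_map]
    refine congrArg₂ _ (by push_cast; ring) (List.map_congr_left fun k _ => ?_)
    simp only [Function.comp]
    push_cast; ring
  · rw [if_pos h, if_neg h2]
    have hc : ((b - a + 2 - 1) / 2).toNat = 1 := by omega
    rw [hc]
    simp

lemma join_cons (s : String) (l : List String) :
    String.join (s :: l) = s ++ String.join l := by
  have key : ∀ (l : List String) (t : String), l.foldl (· ++ ·) t = t ++ l.foldl (· ++ ·) "" := by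
    intro l
    induction l with
    | nil => intro t; simp [List.foldl]
    | cons x xs ih =>
        intro t
        simp only [List.foldl]
        rw [ih (t ++ x), ih ("" ++ x), String.append_assoc]
        simp
  simp only [String.join, List.foldl]
  rw [key l ("" ++ s)]
  simp

lemma loop_eq (t : List String) : ∀ (p : List String) (acc : String),
    (PySem.List.pyRange (p.length : Int) ((p.length : Int) + t.length) 2).foldl
      (fun result i =>
        let key := PySem.List.pyGetD (p ++ t) i ""
        let value := if i + 1 ≥ PySem.List.len (p ++ t) then "missing"
                     else PySem.List.pyGetD (p ++ t) (i + 1) ""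
        result ++ (" " ++ key ++ "=" ++ value)) acc
    = acc ++ String.join ((pairUp t).map (fun kv => " " ++ kv.1 ++ "=" ++ kv.2)) := by
  induction t using pairUp.induct with
  | case1 =>
      intro p acc
      simp [pairUp, pyRange_two_nil, String.join]
  | case2 k =>
      intro p acc
      rw [show ((p.length : Int) + [k].length) = (p.length : Int) + 1 by simp,
          pyRange_two_cons _ _ (by omega), pyRange_two_nil _ _ (by omega)]
      simp only [List.foldl]
      have hk : PySem.List.pyGetD (p ++ [k]) (p.length : Int) "" = k := by
        simp [List.getD]
      have hge : ((p.length : Int)) + 1 ≥ PySem.List.len (p ++ [k]) := by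
        simp [PySem.List.len]
      rw [hk, if_pos hge]
      simp [pairUp, String.join, List.foldl]
  | case3 k v rest ih =>
      intro p acc
      have hlen : ((p.length : Int) + (k :: v :: rest).length) =
          ((p ++ [k, v]).length : Int) + rest.length := by
        simp; ring
      rw [hlen, pyRange_two_cons _ _ (by simp; omega)]
      simp only [List.foldl]
      have hk : PySem.List.pyGetD (p ++ k :: v :: rest) (p.length : Int) "" = k := by
        simp [List.getD]
      have hv : PySem.List.pyGetD (p ++ k :: v :: rest) ((p.length : Int) + 1) "" = v := by
        rw [show ((p.length : Int) + 1) = ((p.length + 1 : Nat) : Int) by push_cast; ring,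
            PySem.List.pyGetD_natCast, List.getD_eq_getElem?_getD,
            List.getElem?_append_right (by omega)]
        simp
      have hlt : ¬ ((p.length : Int) + 1 ≥ PySem.List.len (p ++ k :: v :: rest)) := by
        simp [PySem.List.len]
      rw [hk, if_neg hlt, hv]
      have harr : p ++ k :: v :: rest = (p ++ [k, v]) ++ rest := by simp
      rw [show ((p.length : Int) + 2) = ((p ++ [k, v]).length : Int) by simp,
          harr, ih (p ++ [k, v]) (acc ++ (" " ++ k ++ "=" ++ v))]
      rw [pairUp, List.map_cons, join_cons, String.append_assoc]

-- ===== VERDICT (by name: the statement is the Claim_ definition above) =====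
theorem format_keyvals_py_spec : Claim_equal_format_keyvals_py := by
  intro keyvals _
  unfold Spec_format_keyvals_py format_keyvals_py format_keyvals_py_alt
  by_cases h : keyvals = []
  · subst h; simp [pairUp, String.join]
  · rw [if_neg h]
    have := loop_eq keyvals [] ""
    simp only [List.length_nil, Nat.cast_zero, List.nil_append, zero_add] at this
    simpa using this
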